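-- pv_equiv track=rewrite | github.com/ruza-net/columnator | rendering.py | group_sections
-- ===== SOURCE A (Python) =====
-- def group_sections(lines, col_idx):
-- 	i = 0
-- 	j = 0
-- 	while i < len(lines):
-- 		# Expand downwards until we hit section boundary
-- 		#
-- 		while j < len(lines) and len(lines[j]) > col_idx:
-- 			j += 1
--
-- 		if j - i > 0:
-- 			yield i, j
-- 		else:
-- 			j += 1
--
-- 		# Jump to bottom margin
-- 		#
-- 		i = j
-- ===== SOURCE B (Python) =====
-- def group_sections(lines, col_idx):
--     flags = [len(l) > col_idx for l in lines]
--     starts = [i for i, (prev, cur) in enumerate(zip([False] + flags, flags)) if cur and not prev]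
--     ends = [i + 1 for i, (cur, nxt) in enumerate(zip(flags, flags[1:] + [False])) if cur and not nxt]
--     yield from zip(starts, ends)
-- ===== Notes on version B (the rewrite author's own statement) =====
-- stated objective: alternative
-- what changed: Replaced A's two-pointer run-expanding scan with staged boundary detection: compute a flags list, find run starts and run ends independently by comparing each flag with its shifted neighbour, and zip the two boundary lists.
import Mathlib
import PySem

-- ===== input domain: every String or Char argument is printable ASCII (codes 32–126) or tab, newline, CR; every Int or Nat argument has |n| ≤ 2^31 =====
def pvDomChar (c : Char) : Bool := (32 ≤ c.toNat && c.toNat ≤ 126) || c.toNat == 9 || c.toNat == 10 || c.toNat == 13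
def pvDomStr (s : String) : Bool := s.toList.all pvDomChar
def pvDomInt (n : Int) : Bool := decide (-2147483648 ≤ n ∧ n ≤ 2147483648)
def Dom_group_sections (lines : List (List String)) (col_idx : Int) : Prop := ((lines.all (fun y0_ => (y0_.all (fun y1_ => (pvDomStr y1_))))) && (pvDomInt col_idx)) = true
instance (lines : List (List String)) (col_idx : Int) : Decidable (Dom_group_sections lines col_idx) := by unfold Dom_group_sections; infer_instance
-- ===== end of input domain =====

-- B replaces A's run-scanning two-pointer walk by staged boundary detection: a flags
-- pass, then independent start/end boundary lists found by comparing each flag with its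
-- neighbour, zipped together (return-value equivalence of the fully consumed generators).

-- ===== PORT A =====
-- inner `while j < len(lines) and len(lines[j]) > col_idx: j += 1`
def innerA (lines : List (List String)) (col_idx : Int) (j : Nat) : Nat :=
  if _h : j < lines.length ∧ ((lines.getD j []).length : Int) > col_idx then
    innerA lines col_idx (j + 1)
  else j
termination_by lines.length - j

-- needed by goA's termination proof: the inner loop never moves j backwards
theorem innerA_ge (lines : List (List String)) (col_idx : Int) (j : Nat) :
    j ≤ innerA lines col_idx j := by
  unfold innerA
  split
  · exact le_trans (Nat.le_succ j) (innerA_ge lines col_idx (j + 1))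
  · exact le_refl j
termination_by lines.length - j

-- outer `while i < len(lines)` loop; Python keeps two variables i, j, but at every
-- test of the outer condition i = j holds (the loop body ends with `i = j`), so the
-- loop state is the single index i (= j).
def goA (lines : List (List String)) (col_idx : Int) (i : Nat) : List (Int × Int) :=
  if hi : i < lines.length then
    let j := innerA lines col_idx i
    if (j : Int) - (i : Int) > 0 then
      ((i : Int), (j : Int)) :: goA lines col_idx j
    else
      goA lines col_idx (j + 1)
  else []
termination_by lines.length - i
decreasing_by
  · have := innerA_ge lines col_idx i; omega
  · have := innerA_ge lines col_idx i; omega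

def group_sections (lines : List (List String)) (col_idx : Int) : List (Int × Int) :=
  goA lines col_idx 0

-- ===== PORT B =====
-- the flag predicate `len(l) > col_idx`
def bKey (col_idx : Int) (l : List String) : Bool := decide (((l.length : Int)) > col_idx)

-- `flags = [...]`, then `starts`/`ends` by comparing each flag with its neighbour
-- (zip of flags against the shifted flags list), then `zip(starts, ends)`
def group_sections_alt (lines : List (List String)) (col_idx : Int) : List (Int × Int) :=
  let flags := lines.map (bKey col_idx)
  let starts := (PySem.List.enumerate ((false :: flags).zip flags)).filterMap
      (fun x => if x.2.2 && !x.2.1 then some x.1 else none)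
  let ends := (PySem.List.enumerate (flags.zip (flags.drop 1 ++ [false]))).filterMap
      (fun x => if x.2.1 && !x.2.2 then some (x.1 + 1) else none)
  starts.zip ends

-- ===== PRECONDITION & SPEC =====
def Spec_group_sections (lines : List (List String)) (col_idx : Int) (out : List (Int × Int)) : Prop := out = group_sections_alt lines col_idx
instance (lines : List (List String)) (col_idx : Int) (out : List (Int × Int)) : Decidable (Spec_group_sections lines col_idx out) := by unfold Spec_group_sections; infer_instance

-- ===== CLAIM (what is proved, stated in full; the proofs are below) =====
def Claim_equal_group_sections : Prop := ∀ (lines : List (List String)) (col_idx : Int), Dom_group_sections lines col_idx → Spec_group_sections lines col_idx (group_sections lines col_idx)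

-- ===== LEMMAS AND PROOFS =====

-- proof-side intermediate: run-based grouping over the lines (maximal equal-key runs)
def goB (col_idx : Int) (idx : Int) (ls : List (List String)) : List (Int × Int) :=
  match ls with
  | [] => []
  | l :: rest =>
    let k := bKey col_idx l
    let grp := rest.takeWhile (fun x => bKey col_idx x == k)
    let rest' := rest.dropWhile (fun x => bKey col_idx x == k)
    let n : Int := 1 + grp.length
    if k then (idx, idx + n) :: goB col_idx (idx + n) rest'
    else goB col_idx (idx + n) rest'
termination_by ls.length
decreasing_by
  · have := List.length_dropWhile_le (fun x => bKey col_idx x == bKey col_idx l) rest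
    simpa using Nat.lt_succ_of_le this
  · have := List.length_dropWhile_le (fun x => bKey col_idx x == bKey col_idx l) rest
    simpa using Nat.lt_succ_of_le this

-- proof-side recursive forms of B's two boundary lists, over the flag list
def recStarts (prev : Bool) (i : Int) : List Bool → List Int
  | [] => []
  | c :: rest => if c && !prev then i :: recStarts c (i + 1) rest
                 else recStarts c (i + 1) rest

def recEnds (i : Int) : List Bool → List Int
  | [] => []
  | c :: rest => if c && !(rest.headD false) then (i + 1) :: recEnds (i + 1) rest
                 else recEnds (i + 1) rest

theorem drop_length_takeWhile {α : Type} (p : α → Bool) (l : List α) :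
    l.drop (l.takeWhile p).length = l.dropWhile p := by
  induction l with
  | nil => rfl
  | cons x xs ih =>
    by_cases hx : p x = true
    · simp [hx, ih]
    · simp [hx]

-- innerA characterised as takeWhile over the suffix
theorem innerA_eq (lines : List (List String)) (col_idx : Int) (i : Nat) :
    innerA lines col_idx i
      = i + ((lines.drop i).takeWhile (bKey col_idx)).length := by
  unfold innerA
  split
  · next h =>
    obtain ⟨hlt, hgt⟩ := h
    have hdrop : lines.drop i = lines[i] :: lines.drop (i + 1) :=
      List.drop_eq_getElem_cons hlt
    have hkey : bKey col_idx lines[i] = true := by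
      simp [bKey]
      simpa [List.getD_eq_getElem?_getD, List.getElem?_eq_getElem hlt] using hgt
    rw [innerA_eq lines col_idx (i + 1), hdrop, List.takeWhile_cons, hkey]
    simp; omega
  · next h =>
    by_cases hlt : i < lines.length
    · have hgt : ¬ ((lines.getD i []).length : Int) > col_idx := fun hg => h ⟨hlt, hg⟩
      have hdrop : lines.drop i = lines[i] :: lines.drop (i + 1) :=
        List.drop_eq_getElem_cons hlt
      have hkey : bKey col_idx lines[i] = false := by
        simp [bKey]
        simpa [List.getD_eq_getElem?_getD, List.getElem?_eq_getElem hlt] using hgt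
      rw [hdrop, List.takeWhile_cons, hkey]
      simp
    · have : lines.drop i = [] := List.drop_eq_nil_of_le (Nat.le_of_not_lt hlt)
      simp [this]
termination_by lines.length - i

-- skipping one short line advances goB's index by exactly one
theorem goB_skip_false (col_idx : Int) (idx : Int) (l : List String)
    (ls : List (List String)) (hl : bKey col_idx l = false) :
    goB col_idx idx (l :: ls) = goB col_idx (idx + 1) ls := by
  match ls with
  | [] => simp [goB, hl]
  | x :: ls' =>
    by_cases hx : bKey col_idx x = true
    · rw [goB]
      simp [hl, hx]
    · have hx' : bKey col_idx x = false := by simpa using hx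
      rw [goB, goB]
      simp only [hl, hx', List.takeWhile_cons, List.dropWhile_cons]
      simp only [beq_self_eq_true, if_true, Bool.false_eq_true, if_false, List.length_cons]
      congr 1
      push_cast; ring

-- a long line at i strictly advances the inner loop (used by goA_eq_goB's termination)
theorem innerA_gt (lines : List (List String)) (col_idx : Int) (i : Nat)
    (hlt : i < lines.length) (hkey : bKey col_idx lines[i] = true) :
    i < innerA lines col_idx i := by
  rw [innerA_eq, List.drop_eq_getElem_cons hlt, List.takeWhile_cons, hkey]
  simp

-- A's loop from index i equals run-based grouping over the suffix `drop i`
theorem goA_eq_goB (lines : List (List String)) (col_idx : Int) :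
    ∀ (n i : Nat), lines.length - i ≤ n →
      goA lines col_idx i = goB col_idx (i : Int) (lines.drop i) := by
  intro n
  induction n with
  | zero =>
    intro i hn
    rw [goA, dif_neg (by omega : ¬ i < lines.length)]
    simp [List.drop_eq_nil_of_le (by omega : lines.length ≤ i), goB]
  | succ n ih =>
    intro i hn
    rw [goA]
    split
    · next hlt =>
      have hdrop : lines.drop i = lines[i] :: lines.drop (i + 1) :=
        List.drop_eq_getElem_cons hlt
      have hinner := innerA_eq lines col_idx i
      by_cases hkey : bKey col_idx lines[i] = true
      · set t := ((lines.drop (i+1)).takeWhile (bKey col_idx)).length with ht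
        have hin : innerA lines col_idx i = i + (1 + t) := by
          rw [hinner, hdrop, List.takeWhile_cons, hkey]; simp [ht]; omega
        have hpos : ((innerA lines col_idx i : Int)) - (i : Int) > 0 := by
          rw [hin]; push_cast; omega
        rw [if_pos hpos]
        have hrec : goA lines col_idx (innerA lines col_idx i)
            = goB col_idx ((innerA lines col_idx i : Int)) (lines.drop (innerA lines col_idx i)) := by
          have hgt := innerA_gt lines col_idx i hlt hkey
          exact ih (innerA lines col_idx i) (by omega)
        rw [hrec]
        conv_rhs => rw [hdrop, goB]
        simp only [hkey]
        have htw : (lines.drop (i+1)).takeWhile (fun x => bKey col_idx x == true)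
            = (lines.drop (i+1)).takeWhile (bKey col_idx) := by
          congr 1; funext x; simp
        have hdww : (lines.drop (i+1)).dropWhile (fun x => bKey col_idx x == true)
            = (lines.drop (i+1)).dropWhile (bKey col_idx) := by
          congr 1; funext x; simp
        have hdw : (lines.drop (i+1)).dropWhile (bKey col_idx)
            = lines.drop (i + (1 + t)) := by
          rw [← drop_length_takeWhile (bKey col_idx) (lines.drop (i+1))]
          rw [List.drop_drop]
          congr 1; omega
        simp only [if_true, htw, hdww]
        rw [hin, hdw, ← ht]
        push_cast; ring_nf
      · have hkey' : bKey col_idx lines[i] = false := by simpa using hkey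
        have hin : innerA lines col_idx i = i := by
          rw [hinner, hdrop, List.takeWhile_cons, hkey']; simp
        have hneg : ¬ ((innerA lines col_idx i : Int)) - (i : Int) > 0 := by
          rw [hin]; omega
        rw [if_neg hneg, hin]
        have hrec : goA lines col_idx (i + 1)
            = goB col_idx ((i + 1 : Nat) : Int) (lines.drop (i + 1)) :=
          ih (i + 1) (by omega)
        rw [hrec, hdrop, goB_skip_false col_idx (i : Int) _ _ hkey']
        push_cast; ring_nf
    · next hlt =>
      have : lines.drop i = [] := List.drop_eq_nil_of_le (Nat.le_of_not_lt hlt)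
      simp [this, goB]

-- B's starts comprehension computes recStarts
theorem starts_eq (fs : List Bool) : ∀ (prev : Bool) (i : Int),
    ((PySem.List.enumerate ((prev :: fs).zip fs) i).filterMap
      (fun x => if x.2.2 && !x.2.1 then some x.1 else none)) = recStarts prev i fs := by
  induction fs with
  | nil => intro prev i; simp [PySem.List.enumerate, recStarts]
  | cons c rest ih =>
    intro prev i
    rw [show (prev :: c :: rest).zip (c :: rest) = (prev, c) :: (c :: rest).zip rest from rfl,
        PySem.List.enumerate_cons, List.filterMap_cons, ih]
    cases h : (c && !prev) <;> simp [recStarts, h]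

-- B's ends comprehension computes recEnds
theorem ends_eq (fs : List Bool) : ∀ (i : Int),
    ((PySem.List.enumerate (fs.zip (fs.drop 1 ++ [false])) i).filterMap
      (fun x => if x.2.1 && !x.2.2 then some (x.1 + 1) else none)) = recEnds i fs := by
  induction fs with
  | nil => intro i; simp [PySem.List.enumerate, recEnds]
  | cons c rest ih =>
    intro i
    have hz : (c :: rest).zip ((c :: rest).drop 1 ++ [false])
        = (c, rest.headD false) :: rest.zip (rest.drop 1 ++ [false]) := by
      cases rest <;> rfl
    rw [hz, PySem.List.enumerate_cons, List.filterMap_cons, ih]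
    cases h : (c && !(rest.headD false)) <;> simp_all [recEnds, ← List.headD_eq_head?_getD]

-- a run of trues in recStarts contributes exactly its first index
theorem recStarts_run (m : Nat) : ∀ (j : Int) (fs' : List Bool), fs'.headD false = false →
    recStarts false j (List.replicate (m + 1) true ++ fs')
      = j :: recStarts false (j + (m + 1)) fs' := by
  induction m with
  | zero =>
    intro j fs' h
    cases fs' with
    | nil => simp [recStarts]
    | cons d fs'' =>
      have hd : d = false := by simpa using h
      subst hd
      simp [recStarts]
  | succ m ih =>
    intro j fs' h
    rw [show (m + 1 + 1) = (m + 1) + 1 from rfl, List.replicate_succ, List.cons_append]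
    have : recStarts false j (true :: (List.replicate (m+1) true ++ fs'))
        = j :: recStarts true (j + 1) (List.replicate (m+1) true ++ fs') := by
      simp [recStarts]
    rw [this]
    -- inside the run, prev = true and c = true, so nothing more is emitted until fs'
    have inner : ∀ (k : Nat) (j' : Int), recStarts true j' (List.replicate (k+1) true ++ fs')
        = recStarts false (j' + (k+1)) fs' := by
      intro k
      induction k with
      | zero =>
        intro j'
        cases fs' with
        | nil => simp [recStarts]
        | cons d fs'' =>
          have hd : d = false := by simpa using h
          subst hd
          simp [recStarts]
      | succ k ihk =>
        intro j'
        rw [List.replicate_succ, List.cons_append]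
        have : recStarts true j' (true :: (List.replicate (k+1) true ++ fs'))
            = recStarts true (j' + 1) (List.replicate (k+1) true ++ fs') := by
          simp [recStarts]
        rw [this, ihk]
        congr 1
        push_cast; ring
    rw [inner m (j + 1)]
    congr 2
    push_cast; ring

-- a run of trues in recEnds contributes exactly its one-past-the-end index
theorem recEnds_run (m : Nat) : ∀ (j : Int) (fs' : List Bool), fs'.headD false = false →
    recEnds j (List.replicate (m + 1) true ++ fs')
      = (j + (m + 1)) :: recEnds (j + (m + 1)) fs' := by
  induction m with
  | zero =>
    intro j fs' h
    have hh : (List.replicate 1 true ++ fs') = true :: fs' := by simp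
    rw [hh]
    simp [recEnds, ← List.headD_eq_head?_getD, h]
  | succ m ih =>
    intro j fs' h
    rw [show (m + 1 + 1) = (m + 1) + 1 from rfl, List.replicate_succ, List.cons_append]
    have : recEnds j (true :: (List.replicate (m+1) true ++ fs'))
        = recEnds (j + 1) (List.replicate (m+1) true ++ fs') := by
      simp [recEnds, List.replicate_succ]
    rw [this, ih (j + 1) fs' h]
    have e : j + 1 + ((m : Int) + 1) = j + (((m + 1 : Nat) : Int) + 1) := by push_cast; ring
    rw [e]

-- head of dropWhile fails the predicate
theorem headD_dropWhile_false (fs : List Bool) :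
    (fs.dropWhile (fun x => x == true)).headD false = false := by
  induction fs with
  | nil => rfl
  | cons c rest ih =>
    by_cases hc : c = true
    · subst hc; simpa [List.dropWhile_cons] using ih
    · have : c = false := by simpa using hc
      subst this; simp [List.dropWhile_cons]

-- run-based grouping equals the zip of the two boundary lists
theorem goB_eq_rec (col_idx : Int) :
    ∀ (n : Nat) (ls : List (List String)), ls.length ≤ n → ∀ (idx : Int),
      goB col_idx idx ls
        = (recStarts false idx (ls.map (bKey col_idx))).zip (recEnds idx (ls.map (bKey col_idx))) := by
  intro n
  induction n with
  | zero =>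
    intro ls h idx
    have : ls = [] := List.eq_nil_of_length_eq_zero (by omega)
    subst this
    simp [goB, recStarts, recEnds]
  | succ n ih =>
    intro ls h idx
    match ls with
    | [] => simp [goB, recStarts, recEnds]
    | l :: rest =>
      by_cases hk : bKey col_idx l = true
      · -- long run: peel the whole true run
        rw [goB]
        simp only [hk, if_true]
        set grp := rest.takeWhile (fun x => bKey col_idx x == true) with hgrp
        set rest' := rest.dropWhile (fun x => bKey col_idx x == true) with hrest'
        have hmap : (l :: rest).map (bKey col_idx)
            = List.replicate (grp.length + 1) true ++ rest'.map (bKey col_idx) := by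
          have h1 : rest.map (bKey col_idx)
              = grp.map (bKey col_idx) ++ rest'.map (bKey col_idx) := by
            rw [hgrp, hrest', ← List.map_append, List.takeWhile_append_dropWhile]
          have h2 : grp.map (bKey col_idx) = List.replicate grp.length true := by
            have hall : ∀ b ∈ grp.map (bKey col_idx), b = true := by
              intro b hb
              obtain ⟨x, hx, rfl⟩ := List.mem_map.mp hb
              simpa using List.mem_takeWhile_imp hx
            have := List.eq_replicate_of_mem hall
            simpa using this
          simp [List.map_cons, h1, h2, hk, List.replicate_succ]
        have hsplit : rest.map (bKey col_idx)
            = (rest.map (bKey col_idx)).takeWhile (fun x => x == true)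
              ++ (rest.map (bKey col_idx)).dropWhile (fun x => x == true) := by
          rw [List.takeWhile_append_dropWhile]
        have htw_map : (rest.map (bKey col_idx)).takeWhile (fun x => x == true)
            = grp.map (bKey col_idx) := by
          rw [hgrp, List.takeWhile_map]; rfl
        have hdw_map : (rest.map (bKey col_idx)).dropWhile (fun x => x == true)
            = rest'.map (bKey col_idx) := by
          rw [hrest', List.dropWhile_map]; rfl
        have hhead : (rest'.map (bKey col_idx)).headD false = false := by
          rw [← hdw_map]
          exact headD_dropWhile_false (rest.map (bKey col_idx))
        rw [hmap]
        rw [recStarts_run grp.length idx _ hhead, recEnds_run grp.length idx _ hhead]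
        rw [List.zip_cons_cons]
        have hlen : rest'.length ≤ n := by
          have h1 := List.length_dropWhile_le (fun x => bKey col_idx x == true) rest
          have h2 : (l :: rest).length ≤ n + 1 := h
          simp only [List.length_cons] at h2
          rw [hrest']; omega
        have e : idx + (1 + (grp.length : Int)) = idx + ((grp.length : Int) + 1) := by ring
        rw [e, ih rest' hlen (idx + ((grp.length : Int) + 1))]
      · -- short line: both sides advance by one
        have hk' : bKey col_idx l = false := by simpa using hk
        rw [goB_skip_false col_idx idx l rest hk']
        have hlen : rest.length ≤ n := by
          have : (l :: rest).length ≤ n + 1 := h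
          simpa using this
        rw [ih rest hlen (idx + 1)]
        have hm : (l :: rest).map (bKey col_idx) = false :: rest.map (bKey col_idx) := by
          simp [hk']
        rw [hm]
        have hs : recStarts false idx (false :: rest.map (bKey col_idx))
            = recStarts false (idx + 1) (rest.map (bKey col_idx)) := by
          simp [recStarts]
        have he : recEnds idx (false :: rest.map (bKey col_idx))
            = recEnds (idx + 1) (rest.map (bKey col_idx)) := by
          simp [recEnds]
        rw [hs, he]

-- ===== VERDICT (by name: the statement is the Claim_ definition above) =====
theorem group_sections_spec : Claim_equal_group_sections := by
  intro lines col_idx _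
  unfold Spec_group_sections group_sections group_sections_alt
  have h0 : goA lines col_idx 0 = goB col_idx 0 lines := by
    simpa using goA_eq_goB lines col_idx lines.length 0 (by omega)
  simp only [h0, goB_eq_rec col_idx lines.length lines (le_refl _) 0, starts_eq, ends_eq]
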